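-- pv_equiv track=rewrite | github.com/paiml/depyler | examples/hard_run_stats.py | running_range
-- ===== SOURCE A (Python) =====
-- def running_min(data: list[int]) -> list[int]:
--     result: list[int] = []
--     if len(data) == 0:
--         return result
--     current_min: int = data[0]
--     result.append(current_min)
--     i: int = 1
--     while i < len(data):
--         if data[i] < current_min:
--             current_min = data[i]
--         result.append(current_min)
--         i = i + 1
--     return result
--
-- def running_max(data: list[int]) -> list[int]:
--     result: list[int] = []
--     if len(data) == 0:
--         return result
--     current_max: int = data[0]
--     result.append(current_max)
--     i: int = 1
--     while i < len(data):
--         if data[i] > current_max: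
--             current_max = data[i]
--         result.append(current_max)
--         i = i + 1
--     return result
--
-- def running_range(data: list[int]) -> list[int]:
--     mins: list[int] = running_min(data)
--     maxs: list[int] = running_max(data)
--     result: list[int] = []
--     i: int = 0
--     while i < len(mins):
--         result.append(maxs[i] - mins[i])
--         i = i + 1
--     return result
-- ===== SOURCE B (Python) =====
-- def running_range(data: list[int]) -> list[int]:
--     if len(data) == 0:
--         return []
--     mn = mx = data[0]
--     out = [0]
--     for x in data[1:]:
--         if x < mn:
--             mn = x
--         if x > mx:
--             mx = x
--         out.append(mx - mn)
--     return out
-- ===== Notes on version B (the rewrite author's own statement) =====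
-- stated objective: simpler
-- what changed: Replaces the three-pass structure (running_min array, running_max array, then a combining index loop) with a single fused pass maintaining two scalar running extremes and emitting max-min directly.
import Mathlib
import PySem

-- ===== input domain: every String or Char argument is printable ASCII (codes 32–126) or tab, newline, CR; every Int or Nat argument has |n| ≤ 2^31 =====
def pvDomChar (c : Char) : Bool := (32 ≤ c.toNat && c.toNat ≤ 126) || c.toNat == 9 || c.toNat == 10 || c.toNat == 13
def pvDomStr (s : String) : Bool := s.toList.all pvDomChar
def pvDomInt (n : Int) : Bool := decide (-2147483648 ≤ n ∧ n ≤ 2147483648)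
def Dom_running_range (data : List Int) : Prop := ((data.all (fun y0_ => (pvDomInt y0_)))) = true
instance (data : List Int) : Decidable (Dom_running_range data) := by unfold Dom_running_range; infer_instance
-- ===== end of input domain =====

-- B fuses A's three passes (running_min array, running_max array, combining loop) into one pass keeping two scalar extremes; objective: simpler.


-- ===== PORT A =====
-- while loop of running_min: i walks the tail, current_min is the accumulator, each step appends
def runMinLoop (rest : List Int) (cur : Int) : List Int :=
  match rest with
  | [] => []
  | x :: xs =>
    let cur' := if x < cur then x else cur
    cur' :: runMinLoop xs cur'

def running_min (data : List Int) : List Int :=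
  match data with
  | [] => []
  | d :: rest => d :: runMinLoop rest d

def runMaxLoop (rest : List Int) (cur : Int) : List Int :=
  match rest with
  | [] => []
  | x :: xs =>
    let cur' := if x > cur then x else cur
    cur' :: runMaxLoop xs cur'

def running_max (data : List Int) : List Int :=
  match data with
  | [] => []
  | d :: rest => d :: runMaxLoop rest d

-- combining while loop: walks mins and maxs in step, appending maxs[i] - mins[i]
def combineLoop (mins maxs : List Int) : List Int :=
  match mins, maxs with
  | m :: ms, x :: xs => (x - m) :: combineLoop ms xs
  | _, _ => []

def running_range (data : List Int) : List Int :=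
  combineLoop (running_min data) (running_max data)

-- ===== PORT B =====
-- single fused pass: scalar running min and max, emit mx - mn at each element
def altLoop (rest : List Int) (mn mx : Int) : List Int :=
  match rest with
  | [] => []
  | x :: xs =>
    let mn' := if x < mn then x else mn
    let mx' := if x > mx then x else mx
    (mx' - mn') :: altLoop xs mn' mx'

def running_range_alt (data : List Int) : List Int :=
  match data with
  | [] => []
  | d :: rest => 0 :: altLoop rest d d

-- ===== PRECONDITION & SPEC =====
def Spec_running_range (data : List Int) (out : List Int) : Prop := out = running_range_alt data
instance (data : List Int) (out : List Int) : Decidable (Spec_running_range data out) := by unfold Spec_running_range; infer_instance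

-- ===== CLAIM (what is proved, stated in full; the proofs are below) =====
def Claim_equal_running_range : Prop := ∀ (data : List Int), Dom_running_range data → Spec_running_range data (running_range data)

-- ===== LEMMAS AND PROOFS =====
theorem combine_min_max (rest : List Int) : ∀ (mn mx : Int),
    combineLoop (runMinLoop rest mn) (runMaxLoop rest mx) = altLoop rest mn mx := by
  induction rest with
  | nil => intro mn mx; rfl
  | cons x xs ih =>
    intro mn mx
    simp only [runMinLoop, runMaxLoop, altLoop, combineLoop]
    exact congrArg _ (ih _ _)

-- ===== VERDICT (by name: the statement is the Claim_ definition above) =====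
theorem running_range_spec : Claim_equal_running_range := by
  intro data _
  unfold Spec_running_range
  cases data with
  | nil => rfl
  | cons d rest =>
    simp only [running_range, running_min, running_max, running_range_alt, combineLoop,
      combine_min_max, sub_self]
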